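-- pv_equiv track=rewrite | github.com/phalchanouksa/riabot | backend/ml_engine/services/adaptive_recommender.py | _interleave_categories
-- ===== SOURCE A (Python) =====
-- from typing import Dict, List, Tuple, Optional
--
-- def _interleave_categories(categories: List[int]) -> List[int]:
--     """Mix lower and higher IDs so early questions are more balanced."""
--     if not categories:
--         return []
--
--     ordered = sorted(categories)
--     midpoint = (len(ordered) + 1) // 2
--     left = ordered[:midpoint]
--     right = ordered[midpoint:]
--
--     result = []
--     for i in range(max(len(left), len(right))):
--         if i < len(left):
--             result.append(left[i])
--         if i < len(right):
--             result.append(right[i])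
--     return result
-- ===== SOURCE B (Python) =====
-- def _interleave_categories(categories):
--     """Mix lower and higher IDs so early questions are more balanced."""
--     s = sorted(categories)
--     m = (len(s) + 1) // 2
--     # out-shuffle rank of source index i: 2*(i % m) + i // m
--     indexed = sorted(enumerate(s), key=lambda p: 2 * (p[0] % m) + p[0] // m)
--     return [x for _, x in indexed]
-- ===== Notes on version B (the rewrite author's own statement) =====
-- stated objective: alternative
-- what changed: A slices the sorted list into two halves and runs a position loop that alternately appends from them; B has no halves and no interleaving loop at all: it performs a second key-sort of the enumerated sorted list, ranking each source index i by its out-shuffle rank 2*(i % m) + i // m, and projects the values out.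
import Mathlib
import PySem

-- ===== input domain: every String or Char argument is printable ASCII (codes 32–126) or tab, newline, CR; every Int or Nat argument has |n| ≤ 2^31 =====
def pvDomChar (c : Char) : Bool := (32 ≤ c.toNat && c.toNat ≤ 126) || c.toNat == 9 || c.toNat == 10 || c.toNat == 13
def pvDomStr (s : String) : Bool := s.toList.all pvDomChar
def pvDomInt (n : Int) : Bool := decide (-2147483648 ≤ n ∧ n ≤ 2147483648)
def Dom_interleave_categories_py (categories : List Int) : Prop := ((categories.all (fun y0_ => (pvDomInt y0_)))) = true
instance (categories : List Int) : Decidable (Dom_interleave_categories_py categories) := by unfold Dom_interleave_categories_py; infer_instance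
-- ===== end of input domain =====

-- B replaces A's slice-into-halves-and-alternate-append loop by a second stable key-sort:
-- each sorted index i is given its out-shuffle rank 2*(i % m) + i // m and the pairs are
-- sorted by that rank (alternative decomposition; same O(n log n) cost).

-- ===== PORT A =====
-- loop body of A's 'for i in range(max(len(left), len(right)))'
def pvStepA (left right res : List Int) (i : Int) : List Int :=
  let res := if i < (left.length : Int) then res ++ [PySem.List.pyGetD left i 0] else res
  if i < (right.length : Int) then res ++ [PySem.List.pyGetD right i 0] else res

def interleave_categories_py (categories : List Int) : List Int :=
  if categories = [] then []
  else
    let ordered := PySem.List.sorted categories id false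
    let midpoint : Int := PySem.Int.floordiv ((ordered.length : Int) + 1) 2
    let left := PySem.List.slice ordered none (some midpoint)
    let right := PySem.List.slice ordered (some midpoint) none
    (PySem.List.pyRange 0 (max (left.length : Int) (right.length : Int)) 1).foldl
      (pvStepA left right) []

-- ===== PORT B =====
-- B's 'key=lambda p: 2 * (p[0] % m) + p[0] // m'
def pvKeyB (m : Int) (p : Int × Int) : Int :=
  2 * PySem.Int.mod p.1 m + PySem.Int.floordiv p.1 m

def interleave_categories_py_alt (categories : List Int) : List Int :=
  let s := PySem.List.sorted categories id false
  let m : Int := PySem.Int.floordiv ((s.length : Int) + 1) 2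
  let indexed := PySem.List.sorted (PySem.List.enumerate s 0) (pvKeyB m) false
  indexed.map (·.2)

-- ===== PRECONDITION & SPEC =====
def Spec_interleave_categories_py (categories : List Int) (out : List Int) : Prop := out = interleave_categories_py_alt categories
instance (categories : List Int) (out : List Int) : Decidable (Spec_interleave_categories_py categories out) := by unfold Spec_interleave_categories_py; infer_instance

-- ===== CLAIM (what is proved, stated in full; the proofs are below) =====
def Claim_equal_interleave_categories_py : Prop := ∀ (categories : List Int), Dom_interleave_categories_py categories → Spec_interleave_categories_py categories (interleave_categories_py categories)

-- ===== LEMMAS AND PROOFS =====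

-- canonical interleaving of two halves, head-recursively (proof-side reference function)
def pvIlv {α : Type} : List α → List α → List α
  | [], r => r
  | a :: l, r => a :: pvIlv r l
termination_by l r => l.length + r.length

@[simp] lemma pvIlv_nil {α : Type} (r : List α) : pvIlv [] r = r := by rw [pvIlv]

@[simp] lemma pvIlv_cons {α : Type} (a : α) (l r : List α) :
    pvIlv (a :: l) r = a :: pvIlv r l := by rw [pvIlv]

lemma pvIlv_length {α : Type} (l r : List α) : (pvIlv l r).length = l.length + r.length := by
  induction l, r using pvIlv.induct with
  | case1 r => simp
  | case2 a l r ih => simp [ih]; omega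

lemma pvIlv_perm {α : Type} (l r : List α) : (pvIlv l r).Perm (l ++ r) := by
  induction l, r using pvIlv.induct with
  | case1 r => simp
  | case2 a l r ih =>
    rw [pvIlv_cons, List.cons_append]
    exact (ih.cons a).trans ((List.perm_append_comm).cons a)

lemma pvIlv_map {α β : Type} (f : α → β) (l r : List α) :
    (pvIlv l r).map f = pvIlv (l.map f) (r.map f) := by
  induction l, r using pvIlv.induct with
  | case1 r => simp
  | case2 a l r ih => simp [ih]

lemma pvIlv_getElem? {α : Type} (l r : List α) (hr : r.length ≤ l.length)
    (hl : l.length ≤ r.length + 1) (j : Nat) :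
    (pvIlv l r)[j]? = if j % 2 = 0 then l[j / 2]? else r[j / 2]? := by
  induction l, r using pvIlv.induct generalizing j with
  | case1 r =>
    have hr0 : r = [] := List.eq_nil_of_length_eq_zero (by simpa using hr)
    subst hr0; simp
  | case2 a l r ih =>
    match j with
    | 0 => simp
    | j + 1 =>
      simp only [pvIlv, List.getElem?_cons_succ]
      rw [ih (by simp only [List.length_cons] at hr hl; omega) (by simp only [List.length_cons] at hr hl; omega)]
      rcases Nat.even_or_odd j with ⟨t, ht⟩ | ⟨t, ht⟩
      · subst ht
        rw [if_pos (by omega : (t + t) % 2 = 0), if_neg (by omega : ¬ (t + t + 1) % 2 = 0),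
          (by omega : (t + t) / 2 = t), (by omega : (t + t + 1) / 2 = t)]
      · subst ht
        rw [if_neg (by omega : ¬ (2 * t + 1) % 2 = 0), if_pos (by omega : (2 * t + 1 + 1) % 2 = 0),
          (by omega : (2 * t + 1) / 2 = t), (by omega : (2 * t + 1 + 1) / 2 = t + 1)]
        simp

-- A's loop, from index k on, appends the interleaving of the two dropped halves
lemma pvLoopA (l r : List Int) (hr : r.length ≤ l.length) (hl : l.length ≤ r.length + 1)
    (k : Nat) (acc : List Int) (hk : k ≤ r.length) :
    (PySem.List.pyRange (k : Int) (l.length : Int) 1).foldl (pvStepA l r) acc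
      = acc ++ pvIlv (l.drop k) (r.drop k) := by
  have key : ∀ (d k : Nat) (acc : List Int), k ≤ r.length → l.length - k = d →
      (PySem.List.pyRange (k : Int) (l.length : Int) 1).foldl (pvStepA l r) acc
        = acc ++ pvIlv (l.drop k) (r.drop k) := by
    intro d
    induction d with
    | zero =>
      intro k acc hk hd
      have hkl : k = l.length := by omega
      have hkr : k = r.length := by omega
      rw [PySem.List.pyRange_one_eq_nil (by exact_mod_cast Nat.le_of_eq hkl.symm)]
      rw [List.drop_of_length_le (by omega), List.drop_of_length_le (by omega)]
      simp
    | succ d ih =>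
      intro k acc hk hd
      have hkl : k < l.length := by omega
      rw [PySem.List.pyRange_one_cons (by exact_mod_cast hkl), List.foldl_cons]
      have hcast : ((k : Int) + 1) = ((k + 1 : Nat) : Int) := by push_cast; ring
      by_cases hkr : k < r.length
      · have hstep : pvStepA l r acc (k : Int) = (acc ++ [l[k]]) ++ [r[k]] := by
          unfold pvStepA
          rw [if_pos (by exact_mod_cast hkr), if_pos (by exact_mod_cast hkl)]
          simp [PySem.List.pyGetD_natCast, List.getElem?_eq_getElem hkl,
            List.getElem?_eq_getElem hkr]
        rw [hstep, hcast, ih (k + 1) _ (by omega) (by omega)]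
        rw [List.drop_eq_getElem_cons hkl, List.drop_eq_getElem_cons hkr, pvIlv_cons, pvIlv_cons]
        simp
      · have hkr' : k = r.length := by omega
        have hll : l.length = k + 1 := by omega
        have hstep : pvStepA l r acc (k : Int) = acc ++ [l[k]] := by
          unfold pvStepA
          rw [if_neg (by exact_mod_cast hkr), if_pos (by exact_mod_cast hkl)]
          simp [PySem.List.pyGetD_natCast, List.getElem?_eq_getElem hkl]
        rw [hstep, PySem.List.pyRange_one_eq_nil (by rw [hll]; push_cast; omega)]
        rw [List.drop_eq_getElem_cons hkl, List.drop_of_length_le (by omega : l.length ≤ k + 1),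
          List.drop_of_length_le (by omega : r.length ≤ k), pvIlv_cons, pvIlv_nil]
        simp
  exact key (l.length - k) k acc hk rfl

-- source index placed at output position j by the out-shuffle
def pvIpos (mN j : Nat) : Nat := if j % 2 = 0 then j / 2 else mN + j / 2

-- the out-shuffle rank of the source index at output position j is j itself
lemma pvKey_ipos (n mN j : Nat) (hm : mN = (n + 1) / 2) (hj : j < n) :
    2 * (pvIpos mN j % mN) + pvIpos mN j / mN = j := by
  unfold pvIpos
  by_cases hp : j % 2 = 0
  · rw [if_pos hp]
    have h1 : j / 2 % mN = j / 2 := Nat.mod_eq_of_lt (by omega)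
    have h2 : j / 2 / mN = 0 := Nat.div_eq_of_lt (by omega)
    rw [h1, h2]
    omega
  · rw [if_neg hp]
    have hm0 : 0 < mN := by omega
    have h1 : (mN + j / 2) % mN = j / 2 := by
      rw [Nat.add_mod_left]
      exact Nat.mod_eq_of_lt (by omega)
    have h2 : (mN + j / 2) / mN = 1 := by
      rw [Nat.add_comm, Nat.add_div_right _ hm0, Nat.div_eq_of_lt (by omega)]
    rw [h1, h2]
    omega

lemma pvIpos_lt (n j : Nat) (hj : j < n) : pvIpos ((n + 1) / 2) j < n := by
  unfold pvIpos; split_ifs <;> omega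

theorem interleave_categories_py_spec_aux (categories : List Int) :
    interleave_categories_py categories = interleave_categories_py_alt categories := by
  by_cases hnil : categories = []
  · subst hnil; rfl
  · simp only [interleave_categories_py, interleave_categories_py_alt, if_neg hnil]
    set s := PySem.List.sorted categories id false with hs
    set n := s.length with hn
    set mN := (n + 1) / 2 with hmN
    have hm : PySem.Int.floordiv ((n : Int) + 1) 2 = (mN : Int) := by
      rw [show ((n : Int) + 1) = ((n + 1 : Nat) : Int) by push_cast; ring]
      exact_mod_cast PySem.Int.floordiv_natCast (n + 1) 2
    rw [hm, PySem.List.slice_to_natCast, PySem.List.slice_from_natCast]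
    have hlenl : (s.take mN).length = mN := by rw [List.length_take]; omega
    have hlenr : (s.drop mN).length = n - mN := by rw [List.length_drop]
    have hr' : (s.drop mN).length ≤ (s.take mN).length := by rw [hlenl, hlenr]; omega
    have hl' : (s.take mN).length ≤ (s.drop mN).length + 1 := by rw [hlenl, hlenr]; omega
    have hmax : max ((s.take mN).length : Int) ((s.drop mN).length : Int)
        = ((s.take mN).length : Int) := by
      rw [hlenl, hlenr]
      have : ((n - mN : Nat) : Int) ≤ (mN : Nat) := by omega
      omega
    rw [hmax]
    have hA := pvLoopA (s.take mN) (s.drop mN) hr' hl' 0 [] (by omega)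
    simp only [Nat.cast_zero, List.drop_zero, List.nil_append] at hA
    rw [hA]
    -- B side: the key-sort of the enumerated list is the pairwise interleaving of its halves
    set e := PySem.List.enumerate s 0 with he
    have hel : e.length = n := by rw [he, PySem.List.length_enumerate]
    have helenl : (e.take mN).length = mN := by rw [List.length_take]; omega
    have helenr : (e.drop mN).length = n - mN := by rw [List.length_drop]; omega
    set T := pvIlv (e.take mN) (e.drop mN) with hT
    have hTlen : T.length = n := by rw [hT, pvIlv_length]; omega
    have hTget : ∀ j : Nat, j < n → T[j]? = e[pvIpos mN j]? := by
      intro j hj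
      have hij : pvIpos mN j < n := hmN ▸ pvIpos_lt n j hj
      rw [hT, pvIlv_getElem? _ _ (by omega) (by omega)]
      unfold pvIpos at hij ⊢
      by_cases hp : j % 2 = 0
      · simp only [if_pos hp] at hij ⊢
        exact List.getElem?_take_of_lt (by omega)
      · simp only [if_neg hp] at hij ⊢
        exact List.getElem?_drop
    have hTkey : ∀ (j : Nat) (hj : j < n), pvKeyB (mN : Int) (T[j]'(by omega)) = (j : Int) := by
      intro j hj
      have hij : pvIpos mN j < n := hmN ▸ pvIpos_lt n j hj
      have hg := hTget j hj
      rw [List.getElem?_eq_getElem (by omega : j < T.length), he,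
        PySem.List.getElem?_enumerate,
        List.getElem?_eq_getElem (by omega : pvIpos mN j < s.length)] at hg
      simp only [Option.map_some] at hg
      rw [Option.some.inj hg]
      unfold pvKeyB
      simp only [zero_add]
      rw [PySem.Int.mod_natCast, PySem.Int.floordiv_natCast]
      have hk := pvKey_ipos n mN j hmN hj
      push_cast
      omega
    have hperm : T.Perm e := by
      rw [hT]
      exact (pvIlv_perm _ _).trans (by rw [List.take_append_drop])
    have hpair : T.Pairwise (fun a b => pvKeyB (mN : Int) a < pvKeyB (mN : Int) b) := by
      rw [List.pairwise_iff_getElem]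
      intro i j hi hj hij
      rw [hTkey i (by omega), hTkey j (by omega)]
      exact_mod_cast hij
    rw [PySem.List.sorted_eq_of_perm_of_pairwise_lt e T (pvKeyB (mN : Int)) hperm hpair]
    have hsnd : e.map (·.2) = s := by rw [he]; exact PySem.List.map_snd_enumerate s 0
    rw [hT, pvIlv_map, List.map_take, List.map_drop, hsnd]

-- ===== VERDICT (by name: the statement is the Claim_ definition above) =====
theorem interleave_categories_py_spec : Claim_equal_interleave_categories_py := by
  intro categories _
  exact interleave_categories_py_spec_aux categories
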